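-- pv_equiv track=rewrite | github.com/zhb2000/my-practice | luogu/P1249.py | solve
-- ===== SOURCE A (Python) =====
-- def solve(n: int):
--     if n == 3:
--         return [1, 2]
--     if n == 4:
--         return [1, 3]
--     sum_ = 0
--     arr = []
--     for num in range(2, n):
--         sum_ += num
--         arr.append(num)
--         if sum_ >= n:
--             break
--     if sum_ > n:
--         g = sum_ - n
--         if g == 1:
--             arr[0] = None
--             arr[-1] += 1
--         else:
--             arr[g - 2] = None
--     return arr
-- ===== SOURCE B (Python) =====
-- def solve(n: int):
--     if n == 3:
--         return [1, 2]
--     if n == 4: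
--         return [1, 3]
--     if n <= 2:
--         return []
--     # smallest k with 2+3+...+k = k*(k+1)//2 - 1 >= n, by binary search
--     lo, hi = 2, n
--     while lo < hi:
--         mid = (lo + hi) // 2
--         if mid * (mid + 1) // 2 - 1 >= n:
--             hi = mid
--         else:
--             lo = mid + 1
--     k = lo
--     sum_ = k * (k + 1) // 2 - 1
--     arr = list(range(2, k + 1))
--     g = sum_ - n
--     if g == 1:
--         arr[0] = None
--         arr[-1] += 1
--     elif g >= 2:
--         arr[g - 2] = None
--     return arr
-- ===== Notes on version B (the rewrite author's own statement) =====
-- stated objective: alternative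
-- what changed: Replaces A's accumulate-and-break scan with a binary search for the smallest k whose triangular sum reaches n, then builds the run with range and applies the same excess adjustment.
import Mathlib
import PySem

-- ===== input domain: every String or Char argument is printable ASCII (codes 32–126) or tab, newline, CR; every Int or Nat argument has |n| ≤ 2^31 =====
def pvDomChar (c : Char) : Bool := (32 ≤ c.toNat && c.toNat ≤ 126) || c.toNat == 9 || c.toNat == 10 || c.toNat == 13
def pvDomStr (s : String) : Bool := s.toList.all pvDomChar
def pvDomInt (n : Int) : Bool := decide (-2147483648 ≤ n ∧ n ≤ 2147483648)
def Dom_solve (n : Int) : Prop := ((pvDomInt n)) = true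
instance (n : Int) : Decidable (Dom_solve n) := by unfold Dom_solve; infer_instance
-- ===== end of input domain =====

-- B replaces A's accumulate-and-break scan with a binary search for the break point k
-- (objective: alternative algorithm; both are sub-millisecond on the whole domain).

-- shared final adjustment (identical Python code in A and B):
-- arr[-1] += 1 on the last element
def incLast : List (Option Int) → List (Option Int)
  | [] => []
  | [some x] => [some (x + 1)]
  | [none] => [none]
  | a :: rest => a :: incLast rest

-- if sum_ > n: g = sum_ - n; if g == 1: arr[0] = None; arr[-1] += 1; else: arr[g-2] = None
def applyExcess (n sum : Int) (arr : List Int) : List (Option Int) :=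
  if n < sum then
    let g := sum - n
    if g = 1 then
      incLast ((arr.map some).set 0 none)
    else
      (arr.map some).set (g - 2).toNat none
  else
    arr.map some

-- ===== PORT A =====
-- for num in range(2, n): sum_ += num; arr.append(num); if sum_ >= n: break
def solveLoopA (n : Int) : Int → List Int → Int → Nat → Int × List Int
  | sum, arr, _num, 0 => (sum, arr)
  | sum, arr, num, Nat.succ f =>
    let sum' := sum + num
    let arr' := arr ++ [num]
    if n ≤ sum' then (sum', arr') else solveLoopA n sum' arr' (num + 1) f

def solve (n : Int) : List (Option Int) :=
  if n = 3 then [some 1, some 2]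
  else if n = 4 then [some 1, some 3]
  else
    let r := solveLoopA n 0 [] 2 (n - 2).toNat
    applyExcess n r.1 r.2

-- ===== PORT B =====
-- while lo < hi: mid = (lo+hi)//2; if mid*(mid+1)//2 - 1 >= n: hi = mid else: lo = mid+1
def bsearch (n : Int) : Int → Int → Nat → Int
  | lo, _hi, 0 => lo
  | lo, hi, Nat.succ f =>
    if lo < hi then
      let mid := PySem.Int.floordiv (lo + hi) 2
      if n ≤ PySem.Int.floordiv (mid * (mid + 1)) 2 - 1 then
        bsearch n lo mid f
      else
        bsearch n (mid + 1) hi f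
    else lo

def solve_alt (n : Int) : List (Option Int) :=
  if n = 3 then [some 1, some 2]
  else if n = 4 then [some 1, some 3]
  else if n ≤ 2 then []
  else
    let k := bsearch n 2 n (n - 2).toNat
    let sum := PySem.Int.floordiv (k * (k + 1)) 2 - 1
    let arr := PySem.List.pyRange 2 (k + 1) 1
    applyExcess n sum arr

-- ===== PRECONDITION & SPEC =====
-- Pre_ excludes n < 0, on which A raises IndexError (it assigns into the empty arr).
def Pre_solve (n : Int) : Prop := 0 ≤ n
instance (n : Int) : Decidable (Pre_solve n) := by unfold Pre_solve; infer_instance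
def pvWitness_solve : Int := 7

def Spec_solve (n : Int) (out : List (Option Int)) : Prop := out = solve_alt n
instance (n : Int) (out : List (Option Int)) : Decidable (Spec_solve n out) := by unfold Spec_solve; infer_instance

-- ===== CLAIM (what is proved, stated in full; the proofs are below) =====
def Claim_equal_solve : Prop := ∀ (n : Int), Dom_solve n → Pre_solve n → Spec_solve n (solve n)

-- ===== LEMMAS AND PROOFS =====

-- tri k = 2 + 3 + ... + k = k*(k+1)//2 - 1
def tri (k : Int) : Int := PySem.Int.floordiv (k * (k + 1)) 2 - 1

lemma tri_ediv (k : Int) : tri k = k * (k + 1) / 2 - 1 := by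
  unfold tri
  rw [PySem.Int.floordiv_eq_ediv_of_pos (by norm_num)]

lemma tri_succ (k : Int) : tri (k + 1) = tri k + (k + 1) := by
  rw [tri_ediv, tri_ediv]
  have h : (k + 1) * ((k + 1) + 1) = k * (k + 1) + 2 * (k + 1) := by ring
  rw [h]
  omega

lemma tri_mono {a b : Int} (ha : 0 ≤ a) (hab : a ≤ b) : tri a ≤ tri b := by
  induction b, hab using Int.le_induction with
  | base => exact le_refl _
  | succ m hm ih =>
    rw [tri_succ]
    omega

lemma tri_one : tri 1 = 0 := by decide

lemma tri_self_ge {n : Int} (hn : 2 ≤ n) : n ≤ tri n := by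
  rw [tri_ediv]
  have h : 2 * (n + 1) ≤ n * (n + 1) := by nlinarith
  omega

lemma tri_pred_ge {n : Int} (hn : 5 ≤ n) : n ≤ tri (n - 1) := by
  rw [tri_ediv]
  have h : (n - 1) * ((n - 1) + 1) = n * n - n := by ring
  have h2 : 2 * n + 2 ≤ n * n - n := by nlinarith
  omega

lemma loopA_spec (n k : Int) (hk1 : n ≤ tri k) (hk2 : tri (k - 1) < n) :
    ∀ (fuel : Nat) (num : Int) (arr : List Int),
      2 ≤ num → num ≤ k → (k - num).toNat < fuel →
      solveLoopA n (tri (num - 1)) arr num fuel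
        = (tri k, arr ++ PySem.List.pyRange num (k + 1) 1) := by
  intro fuel
  induction fuel with
  | zero => intro num arr _ _ hf; omega
  | succ f ih =>
    intro num arr h2 hle hf
    have hsum : tri (num - 1) + num = tri num := by
      have := tri_succ (num - 1)
      simp only [sub_add_cancel] at this
      omega
    show (if n ≤ tri (num - 1) + num then _ else _) = _
    rw [hsum]
    by_cases hcase : num = k
    · subst hcase
      rw [if_pos hk1]
      rw [PySem.List.pyRange_one_singleton]
    · have hlt : num < k := lt_of_le_of_ne hle hcase
      have hmono : tri num ≤ tri (k - 1) := tri_mono (by omega) (by omega)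
      rw [if_neg (by omega)]
      have h3 := ih (num + 1) (arr ++ [num]) (by omega) (by omega) (by omega)
      rw [show num + 1 - 1 = num from by ring] at h3
      rw [h3, PySem.List.pyRange_one_cons (show num < k + 1 by omega)]
      simp

lemma bs_spec (n : Int) :
    ∀ (fuel : Nat) (lo hi : Int), 2 ≤ lo → lo ≤ hi → tri (lo - 1) < n → n ≤ tri hi →
      (hi - lo).toNat ≤ fuel →
      lo ≤ bsearch n lo hi fuel ∧ bsearch n lo hi fuel ≤ hi ∧
        n ≤ tri (bsearch n lo hi fuel) ∧ tri (bsearch n lo hi fuel - 1) < n := by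
  intro fuel
  induction fuel with
  | zero =>
    intro lo hi h2 hle hlo hhi hf
    have heq : hi = lo := by omega
    subst heq
    simp only [bsearch]
    exact ⟨le_refl _, le_refl _, hhi, hlo⟩
  | succ f ih =>
    intro lo hi h2 hle hlo hhi hf
    by_cases hlh : lo < hi
    · have hb := PySem.Int.floordiv_two_mid_bounds (le_of_lt hlh)
      have hmlt : PySem.Int.floordiv (lo + hi) 2 < hi := by
        rw [PySem.Int.floordiv_lt_iff_lt_mul (by norm_num)]
        omega
      simp only [bsearch, if_pos hlh]
      by_cases hc : n ≤ PySem.Int.floordiv (PySem.Int.floordiv (lo + hi) 2 * (PySem.Int.floordiv (lo + hi) 2 + 1)) 2 - 1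
      · rw [if_pos hc]
        have hres := ih lo (PySem.Int.floordiv (lo + hi) 2) h2 hb.1 hlo hc (by omega)
        exact ⟨hres.1, by omega, hres.2.2⟩
      · rw [if_neg hc]
        have hc' : tri (PySem.Int.floordiv (lo + hi) 2 + 1 - 1) < n := by
          rw [show PySem.Int.floordiv (lo + hi) 2 + 1 - 1 = PySem.Int.floordiv (lo + hi) 2 from by ring]
          unfold tri
          omega
        have hres := ih (PySem.Int.floordiv (lo + hi) 2 + 1) hi (by omega) (by omega) hc' hhi (by omega)
        exact ⟨by omega, hres.2.1, hres.2.2⟩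
    · have heq : hi = lo := by omega
      subst heq
      simp only [bsearch, if_neg hlh]
      exact ⟨le_refl _, le_refl _, hhi, hlo⟩

-- ===== VERDICT (by name: the statement is the Claim_ definition above) =====
theorem solve_spec : Claim_equal_solve := by
  intro n _ hp
  unfold Spec_solve Pre_solve at *
  by_cases h3 : n = 3
  · subst h3; rfl
  by_cases h4 : n = 4
  · subst h4; rfl
  by_cases hsmall : n ≤ 2
  · have hfuel : (n - 2).toNat = 0 := by omega
    simp only [solve, solve_alt, if_neg h3, if_neg h4, if_pos hsmall, hfuel]
    simp [solveLoopA, applyExcess, show ¬ n < 0 by omega]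
  · have hn5 : 5 ≤ n := by omega
    have hb := bs_spec n (n - 2).toNat 2 n (le_refl 2) (by omega)
      (by rw [show (2:Int) - 1 = 1 from by ring, tri_one]; omega)
      (tri_self_ge (by omega)) (le_refl _)
    obtain ⟨hk_lo, hk_hi, hk1, hk2⟩ := hb
    set k := bsearch n 2 n (n - 2).toNat with hkdef
    have hkn : k < n := by
      by_contra hcon
      rw [not_lt] at hcon
      have hm := tri_mono (a := n - 1) (b := k - 1) (by omega) (by omega)
      have hg := tri_pred_ge hn5
      omega
    have hloop := loopA_spec n k hk1 hk2 (n - 2).toNat 2 [] (le_refl 2) hk_lo (by omega)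
    rw [show tri (2 - 1) = 0 from by decide] at hloop
    simp only [solve, solve_alt, if_neg h3, if_neg h4, if_neg hsmall, ← hkdef, hloop]
    simp only [List.nil_append]
    rfl
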